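-- pv_equiv track=rewrite | github.com/rolfedh/doc-utils | insert_procedure_title.py | has_procedure_title_before
-- ===== SOURCE A (Python) =====
-- def has_procedure_title_before(lines: list[str], step_index: int) -> bool:
--     """
--     Check if there's a .Procedure block title before the numbered steps.
--
--     Looks backward from the step index to find `.Procedure` on its own line.
--     Continues past other block titles (like sub-section titles) until hitting
--     a section heading (= or ==) or the start of the file.
--     """
--     for i in range(step_index - 1, -1, -1):
--         stripped = lines[i].strip()
--         if stripped == '.Procedure':
--             return True
--         # Stop searching if we hit a section heading
--         if stripped.startswith('= ') or stripped.startswith('== '):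
--             return False
--     return False
-- ===== SOURCE B (Python) =====
-- def has_procedure_title_before(lines: list[str], step_index: int) -> bool:
--     # Forward single pass over the prefix: a '.Procedure' line sets the flag,
--     # a section heading clears it; the final flag is the answer.
--     if step_index <= 0:
--         return False
--     found = False
--     for line in lines[:step_index]:
--         s = line.strip()
--         if s == '.Procedure':
--             found = True
--         elif s.startswith('= ') or s.startswith('== '):
--             found = False
--     return found
-- ===== Notes on version B (the rewrite author's own statement) =====
-- stated objective: alternative
-- what changed: Replaces A's backward scan with early returns by a single forward fold over lines[:step_index] maintaining one boolean flag ('.Procedure' seen after the last section heading).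
import Mathlib
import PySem

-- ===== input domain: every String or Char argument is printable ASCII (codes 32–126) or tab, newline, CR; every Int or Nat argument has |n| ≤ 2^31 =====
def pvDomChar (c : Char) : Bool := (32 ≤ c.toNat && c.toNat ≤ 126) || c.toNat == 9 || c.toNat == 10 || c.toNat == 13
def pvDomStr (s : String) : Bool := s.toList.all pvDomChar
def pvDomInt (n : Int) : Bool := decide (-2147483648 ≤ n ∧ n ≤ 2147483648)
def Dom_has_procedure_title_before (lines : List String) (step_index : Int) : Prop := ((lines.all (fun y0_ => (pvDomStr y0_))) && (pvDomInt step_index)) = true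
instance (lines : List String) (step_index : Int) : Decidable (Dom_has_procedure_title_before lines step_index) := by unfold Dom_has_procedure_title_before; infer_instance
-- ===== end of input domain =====

-- B replaces A's backward early-exit scan by a single forward fold over the prefix
-- keeping one boolean flag; same cost, different traversal (objective: alternative).


-- ===== PORT A =====
-- backward scan: for i in range(step_index-1, -1, -1), early return on match/heading
def pvGoA (lines : List String) : List Int → Bool
  | [] => false
  | i :: rest =>
    match PySem.List.pyGet? lines i with
    | none => false   -- IndexError in Python; excluded by Pre_
    | some line =>
      let stripped := PySem.Str.strip line
      if stripped == ".Procedure" then true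
      else if PySem.Str.startswith stripped "= " || PySem.Str.startswith stripped "== " then false
      else pvGoA lines rest

def has_procedure_title_before (lines : List String) (step_index : Int) : Bool :=
  pvGoA lines (PySem.List.pyRange (step_index - 1) (-1) (-1))

-- ===== PORT B =====
-- forward fold over lines[:step_index] with one boolean flag
def pvStepB (found : Bool) (line : String) : Bool :=
  let s := PySem.Str.strip line
  if s == ".Procedure" then true
  else if PySem.Str.startswith s "= " || PySem.Str.startswith s "== " then false
  else found

def has_procedure_title_before_alt (lines : List String) (step_index : Int) : Bool :=
  if step_index ≤ 0 then false
  else (PySem.List.slice lines none (some step_index)).foldl pvStepB false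

-- ===== PRECONDITION & SPEC =====
-- A raises IndexError iff it reads lines[step_index-1] past the end, i.e. 0 < step_index > len(lines)
def Pre_has_procedure_title_before (lines : List String) (step_index : Int) : Prop :=
  step_index ≤ (lines.length : Int) ∨ step_index ≤ 0
instance (lines : List String) (step_index : Int) : Decidable (Pre_has_procedure_title_before lines step_index) := by unfold Pre_has_procedure_title_before; infer_instance

def pvWitness_has_procedure_title_before : List String × Int := (["= Title", ".Procedure", ". step"], 3)


def Spec_has_procedure_title_before (lines : List String) (step_index : Int) (out : Bool) : Prop := out = has_procedure_title_before_alt lines step_index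
instance (lines : List String) (step_index : Int) (out : Bool) : Decidable (Spec_has_procedure_title_before lines step_index out) := by unfold Spec_has_procedure_title_before; infer_instance

-- ===== CLAIM =====
def Claim_equal_has_procedure_title_before : Prop := ∀ (lines : List String) (step_index : Int), Dom_has_procedure_title_before lines step_index → Pre_has_procedure_title_before lines step_index → Spec_has_procedure_title_before lines step_index (has_procedure_title_before lines step_index)


-- ===== LEMMAS AND PROOFS =====

-- A's backward scan from n-1 equals B's forward fold over the first n lines.
theorem pvGoA_eq_foldl (lines : List String) :
    ∀ n : Nat, n ≤ lines.length →
      pvGoA lines (PySem.List.pyRange ((n : Int) - 1) (-1) (-1)) =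
        (lines.take n).foldl pvStepB false := by
  intro n
  induction n with
  | zero =>
      intro _
      rw [PySem.List.pyRange_neg_one_eq_nil (by omega)]
      rfl
  | succ m ih =>
      intro h
      have hm : m < lines.length := by omega
      have hc : ((m + 1 : Nat) : Int) - 1 = (m : Int) := by push_cast; ring
      rw [hc, PySem.List.pyRange_neg_one_cons (by omega)]
      rw [List.take_add_one, List.foldl_append]
      have hget : lines[m]? = some lines[m] := List.getElem?_eq_getElem hm
      simp only [pvGoA, PySem.List.pyGet?_natCast, hget, Option.toList_some, List.foldl_cons,
        List.foldl_nil]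
      have hc2 : (m : Int) - 1 = ((m : Nat) : Int) - 1 := rfl
      rw [hc2, ih (by omega)]
      rfl

-- ===== VERDICT =====
theorem has_procedure_title_before_spec : Claim_equal_has_procedure_title_before := by
  intro lines step_index _dom hpre
  unfold Spec_has_procedure_title_before has_procedure_title_before has_procedure_title_before_alt
  by_cases hle : step_index ≤ 0
  · rw [if_pos hle, PySem.List.pyRange_neg_one_eq_nil (by omega)]
    rfl
  · rw [if_neg hle]
    have hpos : 0 < step_index := by omega
    have hlen : step_index ≤ (lines.length : Int) := by
      rcases hpre with h | h
      · exact h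
      · omega
    rw [PySem.List.slice_to (xs := lines) (b := step_index) (by omega)]
    have hn : (step_index.toNat : Int) = step_index := Int.toNat_of_nonneg (by omega)
    rw [← hn]
    exact pvGoA_eq_foldl lines step_index.toNat (by omega)
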